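-- pv_equiv track=rewrite | github.com/caillardc/DTW_Stage | LoadUnipen.py | is_data_point
-- ===== SOURCE A (Python) =====
-- def is_data_point(inputString):
--     point_list = inputString.split(' ')
--     if len(point_list) == 2:
--         for point in point_list:
--             if not all(char.isdigit() or char == ' ' for char in point):
--                 return False
--         return True
--     else:
--         return False
-- ===== SOURCE B (Python) =====
-- def is_data_point(inputString):
--     # DFA for the regular language  digit*-space-digit*  (exactly one space, all
--     # other characters Unicode digits).  state = spaces seen so far; 2 = dead.
--     state = 0
--     for ch in inputString:
--         if state == 2:
--             break
--         if ch == ' ':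
--             state += 1
--         elif not ch.isdigit():
--             state = 2
--     return state == 1
-- ===== Notes on version B (the rewrite author's own statement) =====
-- stated objective: alternative
-- what changed: B simulates a three-state DFA for the regular language digit*-space-digit* in one pass over the characters (state = spaces seen, with a dead state), instead of splitting the string on the space separator and looping over the resulting token list with early returns.
import Mathlib
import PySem

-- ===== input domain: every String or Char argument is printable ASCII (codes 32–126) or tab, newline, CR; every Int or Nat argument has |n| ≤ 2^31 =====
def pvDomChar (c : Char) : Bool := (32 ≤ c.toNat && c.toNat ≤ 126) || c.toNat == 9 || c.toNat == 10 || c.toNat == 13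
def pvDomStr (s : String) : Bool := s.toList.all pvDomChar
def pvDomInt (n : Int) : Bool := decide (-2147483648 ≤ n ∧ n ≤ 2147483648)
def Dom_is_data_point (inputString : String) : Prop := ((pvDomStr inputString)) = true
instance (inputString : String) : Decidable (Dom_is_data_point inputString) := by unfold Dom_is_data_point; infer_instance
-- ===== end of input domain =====

-- One honest line: B replaces A's split-on-space-and-loop-over-tokens with a one-pass
-- three-state DFA for digit*-space-digit* (objective: alternative; same value everywhere).

-- ===== PORT A =====
-- the genexp's predicate: char.isdigit() or char == ' '
def pvGood (c : Char) : Bool := PySem.Chars.isdigit c || c == ' '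

-- the for-loop with early 'return False' over the split pieces
def pvALoop : List (List Char) → Bool
  | [] => true
  | p :: rest =>
    if !(p.all pvGood) then false
    else pvALoop rest

def is_data_point (inputString : String) : Bool :=
  -- point_list = inputString.split(' '); sep " " is non-empty, Chars.splitOn is the sep ≠ "" form
  let point_list := PySem.Chars.splitOn inputString.toList " ".toList
  if point_list.length = 2 then pvALoop point_list
  else false

-- ===== PORT B =====
-- DFA transition: state = number of spaces seen (2 = dead, absorbing)
def pvBStep (st : Nat) (ch : Char) : Nat :=
  if st == 2 then st
  else if ch = ' ' then st + 1
  else if PySem.Chars.isdigit ch then st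
  else 2

def is_data_point_alt (inputString : String) : Bool :=
  inputString.toList.foldl pvBStep 0 == 1

-- ===== PRECONDITION & SPEC =====
def Spec_is_data_point (inputString : String) (out : Bool) : Prop := out = is_data_point_alt inputString
instance (inputString : String) (out : Bool) : Decidable (Spec_is_data_point inputString out) := by unfold Spec_is_data_point; infer_instance

-- ===== CLAIM (what is proved, stated in full; the proofs are below) =====
def Claim_equal_is_data_point : Prop := ∀ (inputString : String), Dom_is_data_point inputString → Spec_is_data_point inputString (is_data_point inputString)

-- ===== LEMMAS AND PROOFS =====

-- split at every ' ' (empty pieces kept), simple structural recursion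
def pvSplitSp : List Char → List (List Char)
  | [] => [[]]
  | c :: rest =>
    if c = ' ' then [] :: pvSplitSp rest
    else
      match pvSplitSp rest with
      | [] => [[c]]
      | p :: ps => (c :: p) :: ps

def pvConsHead (pre : List Char) : List (List Char) → List (List Char)
  | [] => [pre]
  | p :: ps => (pre ++ p) :: ps

theorem pvSplitSp_ne_nil (cs : List Char) : pvSplitSp cs ≠ [] := by
  cases cs with
  | nil => simp [pvSplitSp]
  | cons c rest =>
    simp only [pvSplitSp]
    split
    · simp
    · cases h : pvSplitSp rest <;> simp

theorem pv_go_split (fuel : Nat) (l cur : List Char) (acc : List (List Char))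
    (h : l.length ≤ fuel) :
    PySem.Chars.splitOn.go [' '] fuel l cur acc =
      acc.reverse ++ pvConsHead cur.reverse (pvSplitSp l) := by
  induction fuel generalizing l cur acc with
  | zero =>
    have : l = [] := by cases l <;> simp_all
    subst this
    simp [PySem.Chars.splitOn.go, pvSplitSp, pvConsHead]
  | succ n ih =>
    cases l with
    | nil => simp [PySem.Chars.splitOn.go, pvSplitSp, pvConsHead]
    | cons c rest =>
      simp only [PySem.Chars.splitOn.go]
      by_cases hc : c = ' '
      · subst hc
        rw [if_pos (by simp [List.isPrefixOf])]
        rw [ih _ _ _ (by simpa using Nat.le_of_succ_le_succ (by simpa using h))]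
        cases hs : pvSplitSp rest with
        | nil => exact absurd hs (pvSplitSp_ne_nil rest)
        | cons p ps => simp [pvSplitSp, pvConsHead, hs]
      · rw [if_neg (by simp [List.isPrefixOf, hc]; exact fun e => hc e.symm)]
        rw [ih _ _ _ (by simpa using Nat.le_of_succ_le_succ (by simpa using h))]
        cases hs : pvSplitSp rest with
        | nil => exact absurd hs (pvSplitSp_ne_nil rest)
        | cons p ps => simp [pvSplitSp, pvConsHead, hs, hc]

theorem pv_splitOn_space (cs : List Char) :
    PySem.Chars.splitOn cs [' '] = pvSplitSp cs := by
  rw [PySem.Chars.splitOn, pv_go_split _ _ _ _ (Nat.le_succ _)]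
  cases hs : pvSplitSp cs with
  | nil => exact absurd hs (pvSplitSp_ne_nil cs)
  | cons p ps => simp [pvConsHead]

theorem pv_length_splitSp (cs : List Char) :
    (pvSplitSp cs).length = cs.count ' ' + 1 := by
  induction cs with
  | nil => simp [pvSplitSp]
  | cons c rest ih =>
    simp only [pvSplitSp]
    by_cases hc : c = ' '
    · subst hc; simp [List.count_cons, ih]
    · rw [if_neg hc]
      cases hs : pvSplitSp rest with
      | nil => exact absurd hs (pvSplitSp_ne_nil rest)
      | cons p ps =>
        simp [hs] at ih
        simp [hc, ih]

theorem pv_flatten_splitSp (cs : List Char) :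
    (pvSplitSp cs).flatten = cs.filter (fun c => c != ' ') := by
  induction cs with
  | nil => simp [pvSplitSp]
  | cons c rest ih =>
    simp only [pvSplitSp]
    by_cases hc : c = ' '
    · subst hc; simp [List.filter_cons, ih]
    · rw [if_neg hc]
      cases hs : pvSplitSp rest with
      | nil => exact absurd hs (pvSplitSp_ne_nil rest)
      | cons p ps =>
        simp [hs] at ih
        simp [List.filter_cons, hc, hs, ← ih]

theorem pvALoop_eq_all (parts : List (List Char)) :
    pvALoop parts = parts.all (fun p => p.all pvGood) := by
  induction parts with
  | nil => rfl
  | cons p rest ih =>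
    simp only [pvALoop, List.all_cons]
    by_cases h : p.all pvGood = true <;> simp [h, ih]

-- spaces satisfy pvGood, so filtering them out does not change the 'all' test
theorem pv_filter_all_good (cs : List Char) :
    (cs.filter (fun c => c != ' ')).all pvGood = cs.all pvGood := by
  induction cs with
  | nil => rfl
  | cons c rest ih =>
    by_cases hc : c = ' '
    · simp [List.filter_cons, hc, ih, pvGood]
    · have hb : (c == ' ') = false := by simp [hc]
      simp [List.filter_cons, hc, hb, ih]

-- the DFA invariant: from a live state st ≤ 1, the run ends in
-- st + count ' ' when the word stays good and the spaces do not overflow, else in 2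
theorem pvB_dead (cs : List Char) : cs.foldl pvBStep 2 = 2 := by
  induction cs with
  | nil => rfl
  | cons d tail iht => simpa [pvBStep] using iht

theorem pvB_run (cs : List Char) (st : Nat) (hst : st ≤ 1) :
    cs.foldl pvBStep st =
      if cs.all pvGood ∧ st + cs.count ' ' ≤ 1 then st + cs.count ' ' else 2 := by
  induction cs generalizing st with
  | nil => simp; omega
  | cons c rest ih =>
    have hdead : rest.foldl pvBStep 2 = 2 := pvB_dead rest
    have hne : (st == 2) = false := by simp; omega
    simp only [List.foldl_cons]
    by_cases hc : c = ' '
    · subst hc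
      have hstep : pvBStep st ' ' = st + 1 := by
        simp [pvBStep, hne]
      rw [hstep]
      by_cases h1 : st + 1 ≤ 1
      · rw [ih (st + 1) h1]
        simp [pvGood, List.count_cons]
        by_cases hall : rest.all pvGood = true <;> { split_ifs <;> simp_all <;> omega }
      · have : st + 1 = 2 := by omega
        rw [this, hdead]
        rw [if_neg]
        rintro ⟨-, h2⟩
        simp [List.count_cons] at h2
        omega
    · by_cases hd : PySem.Chars.isdigit c = true
      · have hstep : pvBStep st c = st := by
          simp [pvBStep, hne, hc, hd]
        rw [hstep, ih st hst]
        simp [pvGood, List.count_cons, hc, hd]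
      · have hstep : pvBStep st c = 2 := by
          simp [pvBStep, hne, hc, hd]
        rw [hstep, hdead]
        rw [if_neg]
        rintro ⟨hall, -⟩
        simp [pvGood, List.all_cons, hd, hc] at hall
    
-- ===== VERDICT (by name: the statement is the Claim_ definition above) =====
theorem is_data_point_spec : Claim_equal_is_data_point := by
  intro s _
  unfold Spec_is_data_point is_data_point is_data_point_alt
  show (if (PySem.Chars.splitOn s.toList [' ']).length = 2
      then pvALoop (PySem.Chars.splitOn s.toList [' ']) else false) = _
  rw [pv_splitOn_space, pvALoop_eq_all, ← List.all_flatten, pv_flatten_splitSp,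
    pv_filter_all_good, pv_length_splitSp, pvB_run s.toList 0 (by omega)]
  by_cases h : s.toList.count ' ' = 1 <;>
    by_cases hall : s.toList.all pvGood = true <;>
    simp [h, hall] <;> split_ifs <;> simp_all <;> omega
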